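-- pv_equiv track=rewrite | github.com/gisaia/ARLAS-EA-datacube-builder | rest_api/datacube.py | merge_download
-- ===== SOURCE A (Python) =====
-- from typing import List, Dict, Tuple
--
-- def merge_download(result_a: Dict[int, List[str]],
--                    result_b: Dict[int, List[str]]) \
--                    -> Dict[int, List[str]]:
--     """
--     Merge the results of the download method in a mapreduce process
--     """
--     for timestamp in list(result_b.keys()):
--         if timestamp in list(result_a.keys()):
--             result_a[timestamp].extend(result_b[timestamp])
--         else:
--             result_a[timestamp] = result_b[timestamp]
--     return result_a
-- ===== SOURCE B (Python) =====
-- def merge_download(result_a, result_b):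
--     merged = {ts: vals + result_b.get(ts, []) for ts, vals in result_a.items()}
--     for ts, vals in result_b.items():
--         if ts not in result_a:
--             merged[ts] = vals
--     return merged
-- ===== Notes on version B (the rewrite author's own statement) =====
-- stated objective: faster
-- what changed: A mutates result_a in place with a branching loop that rebuilds list(result_a.keys()) and does a linear membership scan per key of result_b; B builds a fresh merged dict in one comprehension over result_a (extending each value list via result_b.get) and then adds result_b's novel keys in a second filtered pass with O(1) dict membership tests; B returns a new dict instead of mutating result_a.
import Mathlib
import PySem

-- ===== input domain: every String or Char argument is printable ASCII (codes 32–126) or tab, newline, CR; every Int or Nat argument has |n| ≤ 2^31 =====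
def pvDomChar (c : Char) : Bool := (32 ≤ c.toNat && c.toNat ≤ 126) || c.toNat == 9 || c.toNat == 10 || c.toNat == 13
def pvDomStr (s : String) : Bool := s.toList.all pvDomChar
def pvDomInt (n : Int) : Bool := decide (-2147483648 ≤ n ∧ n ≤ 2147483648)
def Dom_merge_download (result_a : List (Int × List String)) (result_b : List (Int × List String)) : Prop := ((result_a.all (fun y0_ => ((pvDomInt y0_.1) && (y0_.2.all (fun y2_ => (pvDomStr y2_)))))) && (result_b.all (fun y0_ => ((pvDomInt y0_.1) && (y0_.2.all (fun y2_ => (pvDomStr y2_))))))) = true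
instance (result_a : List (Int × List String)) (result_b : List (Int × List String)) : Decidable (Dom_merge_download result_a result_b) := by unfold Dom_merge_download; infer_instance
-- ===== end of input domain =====

-- B builds a fresh merged dict (one comprehension over result_a, then result_b's novel keys)
-- instead of A's single branching in-place loop; equivalence is about the RETURN value only
-- (A mutates result_a in place and returns it, B returns a new dict).

-- ===== PORT A =====

-- d[k] (first entry with key k; [] if absent — in A the key is always present when looked up)
def pvLookup (d : List (Int × List String)) (k : Int) : List String :=
  match d with
  | [] => []
  | p :: rest => if p.1 == k then p.2 else pvLookup rest k

-- result_a[timestamp].extend(v): extend the (first) entry with key k in place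
def pvExtendAt (d : List (Int × List String)) (k : Int) (v : List String) : List (Int × List String) :=
  match d with
  | [] => []
  | p :: rest => if p.1 == k then (p.1, p.2 ++ v) :: rest else p :: pvExtendAt rest k v

def merge_download (result_a : List (Int × List String)) (result_b : List (Int × List String)) : List (Int × List String) :=
  (result_b.map (·.1)).foldl (fun d timestamp =>
    if (d.map (·.1)).contains timestamp then
      pvExtendAt d timestamp (pvLookup result_b timestamp)
    else
      d ++ [(timestamp, pvLookup result_b timestamp)]) result_a

-- ===== PORT B =====

-- merged[ts] = vals: overwrite in place if present, else append (Python dict assignment)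
def pvSetItem (d : List (Int × List String)) (k : Int) (v : List String) : List (Int × List String) :=
  if (d.map (·.1)).contains k then d.map (fun p => if p.1 == k then (k, v) else p)
  else d ++ [(k, v)]

def merge_download_alt (result_a : List (Int × List String)) (result_b : List (Int × List String)) : List (Int × List String) :=
  let merged := result_a.map (fun p => (p.1, p.2 ++ pvLookup result_b p.1))
  result_b.foldl (fun m p =>
    if (result_a.map (·.1)).contains p.1 then m else pvSetItem m p.1 p.2) merged

-- ===== PRECONDITION & SPEC =====
-- Pre_ requires each association list to have distinct keys: only those represent Python
-- dicts (the arguments' type in A), so no input A actually receives is excluded.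
def Pre_merge_download (result_a : List (Int × List String)) (result_b : List (Int × List String)) : Prop :=
  (result_a.map (·.1)).Nodup ∧ (result_b.map (·.1)).Nodup
instance (result_a : List (Int × List String)) (result_b : List (Int × List String)) : Decidable (Pre_merge_download result_a result_b) := by unfold Pre_merge_download; infer_instance

def pvWitness_merge_download : (List (Int × List String)) × (List (Int × List String)) :=
  ([(1, ["a"])], [(1, ["b"]), (2, ["c"])])

def Spec_merge_download (result_a : List (Int × List String)) (result_b : List (Int × List String)) (out : List (Int × List String)) : Prop := out = merge_download_alt result_a result_b
instance (result_a : List (Int × List String)) (result_b : List (Int × List String)) (out : List (Int × List String)) : Decidable (Spec_merge_download result_a result_b out) := by unfold Spec_merge_download; infer_instance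

-- ===== CLAIM (what is proved, stated in full; the proofs are below) =====
def Claim_equal_merge_download : Prop := ∀ (result_a : List (Int × List String)) (result_b : List (Int × List String)), Dom_merge_download result_a result_b → Pre_merge_download result_a result_b → Spec_merge_download result_a result_b (merge_download result_a result_b)

-- ===== LEMMAS AND PROOFS =====

theorem pvLookup_of_mem {rb : List (Int × List String)} {p : Int × List String}
    (hnd : (rb.map (·.1)).Nodup) (hp : p ∈ rb) : pvLookup rb p.1 = p.2 := by
  induction rb with
  | nil => cases hp
  | cons q rest ih =>
    simp only [List.map_cons, List.nodup_cons] at hnd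
    rcases List.mem_cons.mp hp with h | h
    · subst h; simp [pvLookup]
    · have hne : q.1 ≠ p.1 := by
        intro he; exact hnd.1 (he ▸ List.mem_map_of_mem h)
      simp only [pvLookup, beq_iff_eq, if_neg hne]
      exact ih hnd.2 h

theorem pvLookup_of_not_contains {rb : List (Int × List String)} {k : Int}
    (h : (rb.map (·.1)).contains k = false) : pvLookup rb k = [] := by
  induction rb with
  | nil => rfl
  | cons q rest ih =>
    simp only [List.map_cons, List.contains_cons, Bool.or_eq_false_iff] at h
    simp only [pvLookup, beq_iff_eq]
    rw [if_neg (by intro he; exact absurd he.symm (by simpa using h.1))]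
    exact ih h.2

theorem keys_pvExtendAt (d : List (Int × List String)) (k : Int) (v : List String) :
    (pvExtendAt d k v).map (·.1) = d.map (·.1) := by
  induction d with
  | nil => rfl
  | cons q rest ih =>
    by_cases h : q.1 = k
    · simp [pvExtendAt, h]
    · simp [pvExtendAt, h, ih]

-- the comprehension pass absorbs one extend: map over pvExtendAt = map with the head entry of rb folded in
theorem map_pvExtendAt {ra rb' : List (Int × List String)} {k : Int} {v : List String}
    (ha : (ra.map (·.1)).Nodup) (hk : pvLookup rb' k = []) :
    (pvExtendAt ra k v).map (fun p => (p.1, p.2 ++ pvLookup rb' p.1)) =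
    ra.map (fun p => (p.1, p.2 ++ pvLookup ((k, v) :: rb') p.1)) := by
  induction ra with
  | nil => rfl
  | cons q rest ih =>
    simp only [List.map_cons, List.nodup_cons] at ha
    by_cases h : q.1 = k
    · simp only [pvExtendAt, h, beq_self_eq_true, if_true, List.map_cons]
      congr 1
      · simp [pvLookup, hk]
      · apply List.map_congr_left
        intro p hp
        have hne : (k == p.1) = false := by
          refine beq_eq_false_iff_ne.mpr ?_
          intro he
          exact ha.1 (by rw [h, he]; exact List.mem_map_of_mem hp)
        simp [pvLookup, hne]
    · have hq : (q.1 == k) = false := beq_eq_false_iff_ne.mpr h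
      have hq' : (k == q.1) = false := beq_eq_false_iff_ne.mpr (fun he => h he.symm)
      simp only [pvExtendAt, hq, Bool.false_eq_true, if_false, List.map_cons, ih ha.2]
      simp [pvLookup, hq']

-- B's second pass only ever appends: under distinct rb-keys it is an append of the filtered novel items
theorem foldB (ra : List (Int × List String)) :
    ∀ (rb m : List (Int × List String)), (rb.map (·.1)).Nodup →
    (∀ p ∈ rb, (ra.map (·.1)).contains p.1 = false → (m.map (·.1)).contains p.1 = false) →
    rb.foldl (fun m p => if (ra.map (·.1)).contains p.1 then m else pvSetItem m p.1 p.2) m =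
    m ++ rb.filter (fun p => !(ra.map (·.1)).contains p.1) := by
  intro rb
  induction rb with
  | nil => intro m _ _; simp
  | cons q rest ih =>
    intro m hnd hm
    simp only [List.map_cons, List.nodup_cons] at hnd
    by_cases hc : (ra.map (·.1)).contains q.1 = true
    · have hb1 : (!(ra.map (·.1)).contains q.1) = false := by rw [hc]; rfl
      rw [List.foldl_cons, if_pos hc, List.filter_cons, hb1,
        if_neg Bool.false_ne_true]
      exact ih m hnd.2 (fun p hp => hm p (List.mem_cons_of_mem _ hp))
    · have hc' : (ra.map (·.1)).contains q.1 = false := by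
        cases h : (ra.map (·.1)).contains q.1 with
        | false => rfl
        | true => exact absurd h hc
      have hmq : (m.map (·.1)).contains q.1 = false := hm q (List.mem_cons_self) hc'
      have hstep : pvSetItem m q.1 q.2 = m ++ [(q.1, q.2)] := by
        unfold pvSetItem
        rw [hmq, if_neg Bool.false_ne_true]
      have hb1 : (!(ra.map (·.1)).contains q.1) = true := by rw [hc']; rfl
      rw [List.foldl_cons, if_neg hc, hstep, ih (m ++ [(q.1, q.2)]) hnd.2 ?_]
      · rw [List.filter_cons, hb1, if_pos rfl]
        simp [List.append_assoc]
      · intro p hp hpra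
        have hne : p.1 ≠ q.1 := by
          intro he; exact hnd.1 (he ▸ List.mem_map_of_mem hp)
        have hthis := hm p (List.mem_cons_of_mem _ hp) hpra
        simp only [List.map_append, List.map_cons, List.map_nil, List.contains_append, hthis,
          Bool.false_or]
        simp [hne]

-- core induction: A's item-level fold equals (comprehension over ra) ++ (novel items of rb)
theorem mainA : ∀ (rb ra : List (Int × List String)),
    (ra.map (·.1)).Nodup → (rb.map (·.1)).Nodup →
    rb.foldl (fun d p =>
      if (d.map (·.1)).contains p.1 then pvExtendAt d p.1 p.2 else d ++ [p]) ra =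
    ra.map (fun p => (p.1, p.2 ++ pvLookup rb p.1)) ++
      rb.filter (fun p => !(ra.map (·.1)).contains p.1) := by
  intro rb
  induction rb with
  | nil =>
    intro ra _ _
    simp [pvLookup]
  | cons q rest ih =>
    obtain ⟨k, v⟩ := q
    intro ra ha hb
    simp only [List.map_cons, List.nodup_cons] at hb
    have hkq : (rest.map (·.1)).contains k = false := by
      cases h : (rest.map (·.1)).contains k with
      | false => rfl
      | true => exact absurd (by simpa using h) hb.1
    by_cases hc : (ra.map (·.1)).contains k = true
    · have hb1 : (!(ra.map (·.1)).contains k) = false := by rw [hc]; rfl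
      simp only [List.foldl_cons, if_pos hc]
      rw [ih (pvExtendAt ra k v) (by rw [keys_pvExtendAt]; exact ha) hb.2]
      rw [keys_pvExtendAt]
      rw [map_pvExtendAt ha (pvLookup_of_not_contains hkq)]
      rw [List.filter_cons, hb1, if_neg Bool.false_ne_true]
    · have hc' : (ra.map (·.1)).contains k = false := by
        cases h : (ra.map (·.1)).contains k with
        | false => rfl
        | true => exact absurd h hc
      have hb1 : (!(ra.map (·.1)).contains k) = true := by rw [hc']; rfl
      have hknotra : k ∉ List.map (fun x => x.1) ra := by
        intro hmem
        have hcc := List.contains_iff_mem.mpr hmem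
        rw [hc'] at hcc
        exact absurd hcc (by decide)
      simp only [List.foldl_cons, if_neg hc]
      have hnd' : ((ra ++ [(k, v)]).map (·.1)).Nodup := by
        simp only [List.map_append, List.map_cons, List.map_nil]
        refine ha.append (List.nodup_singleton _) ?_
        intro x hx hx2
        simp only [List.mem_singleton] at hx2
        subst hx2
        exact hknotra hx
      rw [ih (ra ++ [(k, v)]) hnd' hb.2]
      simp only [List.map_append, List.map_cons, List.map_nil]
      have hfil : rest.filter (fun p => !((ra.map (·.1)) ++ [k]).contains p.1) =
          rest.filter (fun p => !(ra.map (·.1)).contains p.1) := by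
        apply List.filter_congr
        intro p hp
        have hne : p.1 ≠ k := by
          intro he
          have hmm : p.1 ∈ List.map (fun x => x.1) rest := List.mem_map_of_mem hp
          rw [he] at hmm
          exact hb.1 hmm
        simp [hne]
      have h1 : ra.map (fun p => (p.1, p.2 ++ pvLookup rest p.1))
          = ra.map (fun p => (p.1, p.2 ++ pvLookup ((k, v) :: rest) p.1)) := by
        apply List.map_congr_left
        intro p hp
        have hne : (k == p.1) = false := by
          refine beq_eq_false_iff_ne.mpr ?_
          intro he
          exact hknotra (by rw [he]; exact List.mem_map_of_mem hp)
        simp [pvLookup, hne]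
      have h2 : ((k : Int), v ++ pvLookup rest k) = (k, v) := by
        rw [pvLookup_of_not_contains hkq]; simp
      have h4 : ((k, v) :: rest).filter (fun p => !(ra.map (·.1)).contains p.1)
          = (k, v) :: rest.filter (fun p => !(ra.map (·.1)).contains p.1) := by
        rw [List.filter_cons, hb1, if_pos rfl]
      rw [hfil, h1, h2, h4]
      simp [List.append_assoc]

-- ===== VERDICT (by name: the statement is the Claim_ definition above) =====
theorem merge_download_spec : Claim_equal_merge_download := by
  intro ra rb _ hpre
  obtain ⟨ha, hb⟩ := hpre
  have hA : merge_download ra rb =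
      ra.map (fun p => (p.1, p.2 ++ pvLookup rb p.1)) ++
        rb.filter (fun p => !(ra.map (·.1)).contains p.1) := by
    unfold merge_download
    rw [List.foldl_map]
    exact (PySem.List.foldl_congr_mem _ _ _ ra
      (fun acc x hx => by rw [pvLookup_of_mem hb hx])).trans (mainA rb ra ha hb)
  have hdef : merge_download_alt ra rb =
      List.foldl (fun (m : List (Int × List String)) (p : Int × List String) =>
          if (List.map (fun x => x.1) ra).contains p.1 then m else pvSetItem m p.1 p.2)
        (ra.map (fun p => (p.1, p.2 ++ pvLookup rb p.1))) rb := rfl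
  have hB : merge_download_alt ra rb =
      ra.map (fun p => (p.1, p.2 ++ pvLookup rb p.1)) ++
        rb.filter (fun p => !(ra.map (·.1)).contains p.1) := by
    rw [hdef]
    refine foldB ra rb _ hb ?_
    intro p hp h
    simpa [List.map_map, Function.comp] using h
  unfold Spec_merge_download
  rw [hA, hB]
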